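-- pv_equiv track=rewrite | github.com/SanduVAdelin/Artificial-Intelligence | Laborator9/Laborator9.py | table_init
-- ===== SOURCE A (Python) =====
-- def table_init(rows, cols):
--     table = []
--     for i in range(0, rows):
--         row = []
--         for j in range(0, cols):
--             if i == rows - 1 and j == cols - 1:
--                 row.append(1)
--             else:
--                 row.append(0)
--         table.append(row)
--     return table
-- ===== SOURCE B (Python) =====
-- def table_init(rows, cols):
--     r, c = max(rows, 0), max(cols, 0)
--     flat = [0] * (r * c)
--     if flat:
--         flat[-1] = 1
--     return [flat[i * c:(i + 1) * c] for i in range(r)]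
-- ===== Notes on version B (the rewrite author's own statement) =====
-- stated objective: alternative
-- what changed: Instead of nested loops with a per-cell equality branch, B allocates one flat zero buffer of rows*cols cells, sets its last element to 1, and slices it into rows of cols cells.
import Mathlib
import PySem

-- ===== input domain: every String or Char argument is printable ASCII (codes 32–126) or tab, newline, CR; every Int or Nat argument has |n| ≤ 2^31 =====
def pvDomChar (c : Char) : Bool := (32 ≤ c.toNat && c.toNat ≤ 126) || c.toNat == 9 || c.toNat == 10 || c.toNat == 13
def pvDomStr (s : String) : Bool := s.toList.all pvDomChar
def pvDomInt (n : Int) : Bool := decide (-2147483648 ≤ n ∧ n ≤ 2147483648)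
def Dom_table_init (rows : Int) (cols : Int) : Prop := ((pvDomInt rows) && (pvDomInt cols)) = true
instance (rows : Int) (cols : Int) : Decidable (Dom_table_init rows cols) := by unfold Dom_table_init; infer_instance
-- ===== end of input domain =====

-- B builds one flat zero buffer of rows*cols cells, marks its last cell, and slices it into rows;
-- a flat-buffer construction instead of A's nested per-cell branch loops (objective: alternative, same cost).
-- ===== PORT A =====
def table_init (rows : Int) (cols : Int) : List (List Int) :=
  (PySem.List.pyRange 0 rows 1).foldl (fun table i =>
    table ++ [ (PySem.List.pyRange 0 cols 1).foldl (fun row j =>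
      row ++ [if i = rows - 1 ∧ j = cols - 1 then (1 : Int) else 0]) [] ]) []

-- ===== PORT B =====
def table_init_alt (rows : Int) (cols : Int) : List (List Int) :=
  let r : Int := max rows 0
  let c : Int := max cols 0
  let flat0 : List Int := PySem.List.pyRepeat [(0 : Int)] (r * c)
  let flat : List Int := if flat0 ≠ [] then PySem.List.pySetD flat0 (-1) 1 else flat0
  (PySem.List.pyRange 0 r 1).map (fun i =>
    PySem.List.slice flat (some (i * c)) (some ((i + 1) * c)))

-- ===== PRECONDITION & SPEC =====
def Spec_table_init (rows : Int) (cols : Int) (out : List (List Int)) : Prop := out = table_init_alt rows cols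
instance (rows : Int) (cols : Int) (out : List (List Int)) : Decidable (Spec_table_init rows cols out) := by unfold Spec_table_init; infer_instance

-- ===== CLAIM (what is proved, stated in full; the proofs are below) =====
def Claim_equal_table_init : Prop := ∀ (rows : Int) (cols : Int), Dom_table_init rows cols → Spec_table_init rows cols (table_init rows cols)

-- ===== LEMMAS AND PROOFS =====
theorem flat_marked (n : Nat) (hn : 0 < n) :
    PySem.List.pySetD (List.replicate n (0 : Int)) (-1) 1 =
      List.replicate (n - 1) 0 ++ [1] := by
  simp only [PySem.List.pySetD, PySem.List.pySet?, PySem.List.pyIdx?]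
  rw [if_neg (by norm_num), if_pos (by simp; omega)]
  simp only [Option.map_some, Option.getD_some, List.length_replicate, neg_neg,
    Int.toNat_one]
  apply List.ext_getElem
  · simp; omega
  · intro k h1 h2
    rw [List.getElem_set]
    by_cases hk : n - 1 = k
    · subst hk
      rw [if_pos rfl, List.getElem_append_right (by simp)]
      simp
    · rw [if_neg hk, List.getElem_replicate,
        List.getElem_append_left (by simp at h1 ⊢; omega), List.getElem_replicate]

theorem flat_get (n m : Nat) (hm : m < n)
    (h : m < (List.replicate (n-1) (0:Int) ++ [1]).length) :
    (List.replicate (n - 1) (0:Int) ++ [1])[m] = if m = n - 1 then 1 else 0 := by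
  by_cases hk : m = n - 1
  · subst hk
    rw [if_pos rfl, List.getElem_append_right (by simp)]
    simp
  · rw [if_neg hk, List.getElem_append_left (by simp; omega), List.getElem_replicate]

theorem table_init_eq (rows cols : Int) : table_init rows cols = table_init_alt rows cols := by
  unfold table_init table_init_alt
  simp only [PySem.List.foldl_append_singleton_eq_map, List.nil_append,
    PySem.List.pyRepeat_singleton]
  by_cases hpos : 0 < rows ∧ 0 < cols
  · obtain ⟨hr, hc⟩ := hpos
    have hmr : max rows 0 = rows := by omega
    have hmc : max cols 0 = cols := by omega
    rw [hmr, hmc]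
    set a : Nat := rows.toNat with ha
    set c' : Nat := cols.toNat with hc'
    have hcast : rows * cols = ((a * c' : Nat) : Int) := by
      push_cast [ha, hc', Int.toNat_of_nonneg hr.le, Int.toNat_of_nonneg hc.le]
      ring
    set n : Nat := (rows * cols).toNat with hn
    have hnval : n = a * c' := by rw [hn, hcast, Int.toNat_natCast]
    have ha0 : 0 < a := by omega
    have hc0 : 0 < c' := by omega
    have hn0 : 0 < n := by rw [hnval]; positivity
    have hne : (List.replicate n (0:Int)) ≠ [] := by
      simp [List.replicate_eq_nil_iff]; omega
    rw [if_pos hne, flat_marked n hn0]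
    apply List.ext_getElem
    · simp
    · intro k h1 h2
      simp only [List.getElem_map, PySem.List.getElem_pyRange_one, zero_add]
      simp only [List.length_map, PySem.List.length_pyRange_one] at h1 h2
      have hk : k < a := by omega
      have hb : k * c' + c' ≤ n := by
        rw [hnval, show k * c' + c' = (k+1) * c' by ring]
        exact Nat.mul_le_mul_right _ (by omega)
      have e1 : (k : Int) * cols = ((k * c' : Nat) : Int) := by
        push_cast [hc', Int.toNat_of_nonneg hc.le]; ring
      have e2 : ((k : Int) + 1) * cols = ((k * c' : Nat) : Int) + ((c' : Nat) : Int) := by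
        push_cast [hc', Int.toNat_of_nonneg hc.le]; ring
      rw [e1, e2, PySem.List.slice_natCast_add]
      have hlen : (List.replicate (n-1) (0:Int) ++ [1]).length = n := by simp; omega
      apply List.ext_getElem
      · simp only [List.length_map, PySem.List.length_pyRange_one, List.length_take,
          List.length_drop, hlen]
        omega
      · intro j j1 j2
        simp only [List.length_map, PySem.List.length_pyRange_one] at j1
        have hj : j < c' := by omega
        rw [List.getElem_map]
        simp only [PySem.List.getElem_pyRange_one, zero_add]
        rw [List.getElem_take, List.getElem_drop, flat_get n _ (by omega)]
        have key : (k * c' + j = n - 1) ↔ (k = a - 1 ∧ j = c' - 1) := by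
          by_cases hk1 : k = a - 1
          · have e3 : k * c' + c' = a * c' := by
              rw [show k * c' + c' = (k+1) * c' by ring, show k + 1 = a by omega]
            omega
          · have hk2 : k + 2 ≤ a := by omega
            have e4 : k * c' + c' + c' ≤ a * c' := by
              rw [show k * c' + c' + c' = (k+2) * c' by ring]
              exact Nat.mul_le_mul_right _ hk2
            omega
        have keyInt : ((k:Int) = rows - 1 ∧ (j:Int) = cols - 1) ↔ (k = a - 1 ∧ j = c' - 1) := by
          omega
        by_cases hcond : (k:Int) = rows - 1 ∧ (j:Int) = cols - 1
        · rw [if_pos hcond, if_pos (key.mpr (keyInt.mp hcond))]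
        · rw [if_neg hcond, if_neg (fun h => hcond (keyInt.mpr (key.mp h)))]
  · -- rows ≤ 0 or cols ≤ 0: the flat buffer is empty and every row is empty on both sides
    have hprod : (max rows 0 * max cols 0).toNat = 0 := by
      rcases (by omega : max rows 0 = 0 ∨ max cols 0 = 0) with h | h <;> simp [h]
    rw [show List.replicate (max rows 0 * max cols 0).toNat (0:Int) = [] by simp [hprod]]
    rw [if_neg (by simp)]
    by_cases hr : rows ≤ 0
    · rw [PySem.List.pyRange_one_eq_nil (by omega : rows ≤ (0:Int)),
        PySem.List.pyRange_one_eq_nil (by omega : max rows 0 ≤ (0:Int))]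
      simp
    · have hc : cols ≤ 0 := by omega
      rw [show max rows 0 = rows by omega]
      apply List.map_congr_left
      intro i _
      rw [PySem.List.pyRange_one_eq_nil hc]
      simp [PySem.List.slice]

-- ===== VERDICT (by name: the statement is the Claim_ definition above) =====
theorem table_init_spec : Claim_equal_table_init := by
  intro rows cols _
  unfold Spec_table_init
  exact table_init_eq rows cols
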